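-- pv_equiv track=rewrite | github.com/DO-NE/ProteomicsAgent | taxon/algorithms/abundance_em_core/mapping_matrix.py | _trypsin_cleave
-- ===== SOURCE A (Python) =====
-- from typing import Iterator, Optional
--
-- def _trypsin_cleave(
--     sequence: str,
--     missed_cleavages: int,
--     min_length: int,
--     max_length: int,
-- ) -> Iterator[str]:
--     """Pure-python trypsin digestion ('cuts after K/R, not before P').
--
--     Generates all peptides obtainable with up to ``missed_cleavages`` skipped
--     cleavage sites and emits those whose length lies in
--     ``[min_length, max_length]``.
--     """
--     n = len(sequence)
--     if n == 0:
--         return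
--
--     # Cut points: indices i (1..n-1) where sequence[i-1] in {K,R} and
--     # sequence[i] != P. The peptide ends just before each cut point and the
--     # final peptide ends at n.
--     cut_sites: list = [0]
--     for i in range(1, n):
--         if sequence[i - 1] in ("K", "R") and sequence[i] != "P":
--             cut_sites.append(i)
--     cut_sites.append(n)
--
--     n_sites = len(cut_sites)
--     # Each contiguous run of (missed_cleavages + 1) "fragments" is one peptide.
--     for start_idx in range(n_sites - 1):
--         for skip in range(missed_cleavages + 1):
--             end_idx = start_idx + skip + 1
--             if end_idx >= n_sites:
--                 break
--             pep = sequence[cut_sites[start_idx] : cut_sites[end_idx]]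
--             if min_length <= len(pep) <= max_length:
--                 yield pep
-- ===== SOURCE B (Python) =====
-- def _trypsin_cleave(
--     sequence: str,
--     missed_cleavages: int,
--     min_length: int,
--     max_length: int,
-- ):
--     """Trypsin digestion via fragments: split once at cleavage sites, then
--     grow a running peptide fragment-by-fragment, stopping early once it is
--     longer than max_length (length only grows with more missed cleavages)."""
--     if not sequence:
--         return
--
--     # Fragments between consecutive cut sites ('cut after K/R, not before P').
--     fragments = []
--     buf = sequence[0]
--     prev = sequence[0]
--     for ch in sequence[1:]:
--         if prev in "KR" and ch != "P":
--             fragments.append(buf)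
--             buf = ""
--         buf += ch
--         prev = ch
--     fragments.append(buf)
--
--     # A peptide is the concatenation of up to `window` consecutive fragments.
--     window = max(missed_cleavages + 1, 0)
--     for start in range(len(fragments)):
--         pep = ""
--         for frag in fragments[start : start + window]:
--             pep += frag
--             if len(pep) > max_length:
--                 break
--             if len(pep) >= min_length:
--                 yield pep
-- ===== Notes on version B (the rewrite author's own statement) =====
-- stated objective: alternative
-- what changed: B splits the sequence once into fragments between consecutive trypsin cut sites and grows a running accumulated peptide fragment-by-fragment with an early break once it exceeds max_length, instead of A's cut-site index list with per-peptide re-slicing of the full sequence.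
import Mathlib
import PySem

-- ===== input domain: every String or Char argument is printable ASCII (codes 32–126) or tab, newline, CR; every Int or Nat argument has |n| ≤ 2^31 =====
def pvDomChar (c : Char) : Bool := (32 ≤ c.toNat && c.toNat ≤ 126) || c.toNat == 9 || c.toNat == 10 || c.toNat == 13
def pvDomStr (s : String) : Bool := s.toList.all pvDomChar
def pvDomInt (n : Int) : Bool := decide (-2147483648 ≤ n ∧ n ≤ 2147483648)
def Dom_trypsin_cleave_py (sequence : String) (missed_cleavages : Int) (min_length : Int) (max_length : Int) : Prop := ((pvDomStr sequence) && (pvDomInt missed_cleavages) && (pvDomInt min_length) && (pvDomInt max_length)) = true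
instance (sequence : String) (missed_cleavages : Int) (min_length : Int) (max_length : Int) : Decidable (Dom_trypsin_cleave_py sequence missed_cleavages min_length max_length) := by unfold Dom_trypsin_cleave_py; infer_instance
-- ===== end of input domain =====

-- B replaces A's index arithmetic (cut-site positions + re-slicing the full sequence) by a
-- one-pass split into fragments and a running accumulated peptide with an early break once
-- the peptide exceeds max_length (objective: alternative decomposition, same cost class).

-- ===== PORT A =====
-- inner 'for skip in range(missed_cleavages + 1)' loop of A (counter form of the
-- lazy range, so huge missed_cleavages stay evaluable), with its 'break'
def pvInnerA (cs : List Char) (cut_sites : List Int) (n_sites : Int)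
    (start_idx min_length max_length : Int) (skip stop : Int) : List String :=
  if _h : stop ≤ skip then []
  else
    let end_idx := start_idx + skip + 1
    if n_sites ≤ end_idx then []
    else
      let pep := PySem.List.slice cs (some (PySem.List.pyGetD cut_sites start_idx 0))
                                     (some (PySem.List.pyGetD cut_sites end_idx 0))
      (if min_length ≤ (pep.length : Int) ∧ (pep.length : Int) ≤ max_length
       then [String.ofList pep] else []) ++
      pvInnerA cs cut_sites n_sites start_idx min_length max_length (skip + 1) stop
termination_by (stop - skip).toNat
decreasing_by omega

def trypsin_cleave_py (sequence : String) (missed_cleavages : Int) (min_length : Int)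
    (max_length : Int) : List String :=
  let cs := sequence.toList
  let n : Int := cs.length
  if n = 0 then []
  else
    let cut_sites : List Int :=
      (PySem.List.pyRange 1 n 1).foldl (fun acc i =>
        if (PySem.List.pyGetD cs (i - 1) ' ' = 'K' ∨ PySem.List.pyGetD cs (i - 1) ' ' = 'R')
            ∧ PySem.List.pyGetD cs i ' ' ≠ 'P'
        then acc ++ [i] else acc) [0]
    let cut_sites := cut_sites ++ [n]
    let n_sites : Int := cut_sites.length
    (PySem.List.pyRange 0 (n_sites - 1) 1).foldl (fun out start_idx =>
      out ++ pvInnerA cs cut_sites n_sites start_idx min_length max_length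
               0 (missed_cleavages + 1)) []

-- ===== PORT B =====
-- state of B's fragment-building loop: (fragments, buf, prev)
def pvFragStep (st : List (List Char) × List Char × Char) (ch : Char) :
    List (List Char) × List Char × Char :=
  if (st.2.2 = 'K' ∨ st.2.2 = 'R') ∧ ch ≠ 'P'
  then (st.1 ++ [st.2.1], [ch], ch)
  else (st.1, st.2.1 ++ [ch], ch)

def pvFragments (c0 : Char) (rest : List Char) : List (List Char) :=
  let st := rest.foldl pvFragStep ([], [c0], c0)
  st.1 ++ [st.2.1]

-- inner 'for frag in fragments[start : start + window]' loop of B, with its early break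
def pvInnerB (min_length max_length : Int) (pep : List Char) : List (List Char) → List String
  | [] => []
  | f :: rest =>
    let pep' := pep ++ f
    if max_length < (pep'.length : Int) then []
    else
      (if min_length ≤ (pep'.length : Int) then [String.ofList pep'] else []) ++
      pvInnerB min_length max_length pep' rest

def trypsin_cleave_py_alt (sequence : String) (missed_cleavages : Int) (min_length : Int)
    (max_length : Int) : List String :=
  match sequence.toList with
  | [] => []
  | c0 :: rest =>
    let fragments := pvFragments c0 rest
    let window : Int := max (missed_cleavages + 1) 0
    (PySem.List.pyRange 0 (fragments.length : Int) 1).foldl (fun out start =>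
      out ++ pvInnerB min_length max_length []
               (PySem.List.slice fragments (some start) (some (start + window)))) []

-- ===== PRECONDITION & SPEC =====
def Spec_trypsin_cleave_py (sequence : String) (missed_cleavages : Int) (min_length : Int) (max_length : Int) (out : List String) : Prop := out = trypsin_cleave_py_alt sequence missed_cleavages min_length max_length
instance (sequence : String) (missed_cleavages : Int) (min_length : Int) (max_length : Int) (out : List String) : Decidable (Spec_trypsin_cleave_py sequence missed_cleavages min_length max_length out) := by unfold Spec_trypsin_cleave_py; infer_instance

-- ===== CLAIM (what is proved, stated in full; the proofs are below) =====
def Claim_equal_trypsin_cleave_py : Prop := ∀ (sequence : String) (missed_cleavages : Int) (min_length : Int) (max_length : Int), Dom_trypsin_cleave_py sequence missed_cleavages min_length max_length → Spec_trypsin_cleave_py sequence missed_cleavages min_length max_length (trypsin_cleave_py sequence missed_cleavages min_length max_length)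

-- ===== LEMMAS AND PROOFS =====
-- running cut-site positions of a fragment list (proof helper)
def pvScan : List (List Char) → Int → List Int
  | [], a => [a]
  | fr :: t, a => a :: pvScan t (a + (fr.length : Int))

theorem pvScan_length (frs : List (List Char)) (a : Int) :
    (pvScan frs a).length = frs.length + 1 := by
  induction frs generalizing a with
  | nil => simp [pvScan]
  | cons f t ih => simp [pvScan, ih]

theorem pvScan_append_singleton (frs : List (List Char)) (b : List Char) (a : Int) :
    pvScan (frs ++ [b]) a = pvScan frs a ++ [a + (frs.flatten.length : Int) + (b.length : Int)] := by
  induction frs generalizing a with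
  | nil => simp [pvScan]
  | cons f t ih => simp [pvScan, ih]; ring

theorem pvScan_getD (frs : List (List Char)) (a : Int) (j : Nat) (hj : j ≤ frs.length) :
    (pvScan frs a).getD j 0 = a + ((frs.take j).flatten.length : Int) := by
  induction frs generalizing a j with
  | nil =>
    have : j = 0 := by simpa using hj
    simp [this, pvScan]
  | cons f t ih =>
    cases j with
    | zero => simp [pvScan]
    | succ j =>
      simp only [pvScan, List.getD_cons_succ]
      rw [ih _ j (by simpa using hj)]
      simp; ring

theorem pvFlattenTakeSucc (l : List (List Char)) (t : Nat) (ht : t < l.length) :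
    (l.take (t + 1)).flatten = (l.take t).flatten ++ l[t] := by
  rw [List.take_add, List.flatten_append]
  congr 1
  rw [List.take_one, List.head?_drop, List.getElem?_eq_getElem ht]
  simp

theorem pvLenMono (l : List (List Char)) (t t' : Nat) (h : t ≤ t') :
    (l.take t).flatten.length ≤ (l.take t').flatten.length := by
  have : t' = t + (t' - t) := by omega
  rw [this, List.take_add]
  simp

theorem pvSlice_flatten (frs : List (List Char)) (s e : Nat) (hse : s ≤ e) :
    PySem.List.slice frs.flatten (some (((frs.take s).flatten.length : Nat) : Int))
      (some (((frs.take e).flatten.length : Nat) : Int))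
    = ((frs.drop s).take (e - s)).flatten := by
  rw [PySem.List.slice_natCast]
  have htake : frs.take e = frs.take s ++ (frs.drop s).take (e - s) := by
    conv_lhs => rw [show e = s + (e - s) from by omega]
    rw [List.take_add]
  have hlen : (frs.take e).flatten.length
      = (frs.take s).flatten.length + ((frs.drop s).take (e - s)).flatten.length := by
    rw [htake]; simp
  have h1 : frs.flatten = (frs.take s).flatten ++ (((frs.drop s).take (e - s)).flatten
      ++ ((frs.drop s).drop (e - s)).flatten) := by
    conv_lhs => rw [← List.take_append_drop s frs]
    rw [List.flatten_append]
    congr 1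
    conv_lhs => rw [← List.take_append_drop (e - s) (frs.drop s)]
    rw [List.flatten_append]
  rw [h1, List.drop_left, hlen, Nat.add_sub_cancel_left]
  exact List.take_left

theorem pvFrag_flatten (pending : List Char) : ∀ (frs : List (List Char)) (buf : List Char) (prev : Char),
    ((pending.foldl pvFragStep (frs, buf, prev)).1
      ++ [(pending.foldl pvFragStep (frs, buf, prev)).2.1]).flatten
    = frs.flatten ++ buf ++ pending := by
  induction pending with
  | nil => intro frs buf prev; simp
  | cons ch pending ih =>
    intro frs buf prev
    simp only [List.foldl_cons, pvFragStep]
    split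
    · rw [ih]; simp
    · rw [ih]; simp

theorem pvSites_align (cs : List Char) (pending : List Char) :
    ∀ (done : List Char) (frs : List (List Char)) (buf : List Char) (prev : Char)
      (hbuf : buf ≠ []) (_ : buf.getLast hbuf = prev) (_ : done = frs.flatten ++ buf)
      (_ : cs = done ++ pending),
    ((PySem.List.pyRange (done.length : Int) (cs.length : Int) 1).foldl
        (fun acc i =>
          if (PySem.List.pyGetD cs (i - 1) ' ' = 'K' ∨ PySem.List.pyGetD cs (i - 1) ' ' = 'R')
              ∧ PySem.List.pyGetD cs i ' ' ≠ 'P'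
          then acc ++ [i] else acc) (pvScan frs 0))
      ++ [(cs.length : Int)]
    = pvScan ((pending.foldl pvFragStep (frs, buf, prev)).1
        ++ [(pending.foldl pvFragStep (frs, buf, prev)).2.1]) 0 := by
  induction pending with
  | nil =>
    intro done frs buf prev hbuf hprev hdone hcs
    have hlen : cs.length = done.length := by rw [hcs]; simp
    rw [PySem.List.pyRange_one_eq_nil (by rw [hlen])]
    simp only [List.foldl_nil]
    rw [pvScan_append_singleton]
    have : (cs.length : Int) = 0 + (frs.flatten.length : Int) + (buf.length : Int) := by
      rw [hlen, hdone]; simp [List.length_append]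
    rw [this]
  | cons ch pending ih =>
    intro done frs buf prev hbuf hprev hdone hcs
    have hblen : 1 ≤ buf.length := by
      rcases buf with _ | ⟨b, bs⟩
      · exact absurd rfl hbuf
      · simp
    have hdlen : 1 ≤ done.length := by
      rw [hdone]; simp only [List.length_append]; omega
    have hlt : (done.length : Int) < (cs.length : Int) := by rw [hcs]; simp
    rw [PySem.List.pyRange_one_cons hlt, List.foldl_cons]
    have hget1 : PySem.List.pyGetD cs ((done.length : Int)) ' ' = ch := by
      rw [PySem.List.pyGetD_natCast, hcs]
      simp [List.getD]
    have hcast : ((done.length : Int)) - 1 = ((done.length - 1 : Nat) : Int) := by omega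
    have hdone_ne : done ≠ [] := List.ne_nil_of_length_pos (by omega)
    have hidx : done.length - 1 < done.length := by omega
    have h3 : done.getLast hdone_ne = prev := by
      rw [← hprev]
      subst hdone
      exact List.getLast_append_of_ne_nil (by simp [hbuf]) hbuf
    have hget0 : PySem.List.pyGetD cs ((done.length : Int) - 1) ' ' = prev := by
      rw [hcast, PySem.List.pyGetD_natCast, hcs]
      rw [List.getD_eq_getElem?_getD, List.getElem?_append_left hidx]
      rw [List.getElem?_eq_getElem hidx, Option.getD_some]
      rw [← List.getLast_eq_getElem hdone_ne]
      exact h3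
    rw [hget1, hget0]
    simp only [List.foldl_cons, pvFragStep]
    by_cases hc : (prev = 'K' ∨ prev = 'R') ∧ ch ≠ 'P'
    · rw [if_pos hc, if_pos hc]
      have hacc : pvScan frs 0 ++ [(done.length : Int)] = pvScan (frs ++ [buf]) 0 := by
        rw [pvScan_append_singleton]
        congr 2
        rw [hdone]; simp [List.length_append]
      rw [hacc]
      have := ih (done ++ [ch]) (frs ++ [buf]) [ch] ch (by simp) (by simp)
        (by rw [hdone]; simp) (by rw [hcs]; simp)
      simpa using this
    · rw [if_neg hc, if_neg hc]
      have hlast : (buf ++ [ch]).getLast (by simp) = ch := by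
        simp [List.getLast_append_of_ne_nil]
      have := ih (done ++ [ch]) frs (buf ++ [ch]) ch (by simp) hlast
        (by rw [hdone]; simp) (by rw [hcs]; simp)
      simpa using this

theorem pvInnerA_nil (cs : List Char) (sites : List Int) (ns st minL maxL lo stop : Int)
    (h : ∀ i : Int, lo ≤ i → i < stop → ¬ ns ≤ st + i + 1 →
      maxL < (((PySem.List.slice cs (some (PySem.List.pyGetD sites st 0))
        (some (PySem.List.pyGetD sites (st + i + 1) 0))).length : Nat) : Int)) :
    ∀ (fuel : Nat) (skip : Int), lo ≤ skip → (stop - skip).toNat ≤ fuel →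
      pvInnerA cs sites ns st minL maxL skip stop = [] := by
  intro fuel
  induction fuel with
  | zero =>
    intro skip hlo hf
    rw [pvInnerA, dif_pos (by omega)]
  | succ fuel ih =>
    intro skip hlo hf
    rw [pvInnerA]
    split
    · rfl
    · rename_i hlt
      simp only []
      split
      · rfl
      · rename_i hg
        rw [if_neg, List.nil_append]
        · exact ih (skip + 1) (by omega) (by omega)
        · rintro ⟨-, h2⟩
          exact absurd h2 (not_le.mpr (h skip hlo (by omega) hg))

theorem pvInner_eq (frs : List (List Char)) (mc minL maxL : Int) (s : Nat) (hs : s < frs.length) :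
    ∀ (fuel t : Nat), (mc + 1).toNat - t ≤ fuel →
    pvInnerA frs.flatten (pvScan frs 0) ((frs.length : Int) + 1) (s : Int) minL maxL
        (t : Int) (mc + 1)
    = pvInnerB minL maxL ((frs.drop s).take t).flatten
        (((frs.drop s).take ((mc + 1).toNat)).drop t) := by
  intro fuel
  induction fuel with
  | zero =>
    intro t ht
    have h : (mc + 1).toNat ≤ t := by omega
    rw [pvInnerA, dif_pos (by omega)]
    rw [show ((frs.drop s).take ((mc + 1).toNat)).drop t = []
      from List.drop_eq_nil_of_le (by simp only [List.length_take, List.length_drop]; omega)]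
    rfl
  | succ fuel ih =>
    intro t ht
    by_cases h : (mc + 1).toNat ≤ t
    · rw [pvInnerA, dif_pos (by omega)]
      rw [show ((frs.drop s).take ((mc + 1).toNat)).drop t = []
        from List.drop_eq_nil_of_le (by simp only [List.length_take, List.length_drop]; omega)]
      rfl
    · have htW : t < (mc + 1).toNat := not_le.mp h
      rw [pvInnerA, dif_neg (by omega)]
      simp only []
      by_cases hg : ((frs.length : Int) + 1) ≤ (s : Int) + (t : Int) + 1
      · rw [if_pos hg]
        rw [show ((frs.drop s).take ((mc + 1).toNat)).drop t = []
          from List.drop_eq_nil_of_le (by simp only [List.length_take, List.length_drop]; omega)]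
        rfl
      · rw [if_neg hg]
        have hsk : s ≤ frs.length := le_of_lt hs
        have hst1 : s + t + 1 ≤ frs.length := by omega
        have hgs : PySem.List.pyGetD (pvScan frs 0) ((s : Nat) : Int) 0
            = (((frs.take s).flatten.length : Nat) : Int) := by
          rw [PySem.List.pyGetD_natCast, pvScan_getD frs 0 s hsk]
          simp
        have hcast : ((s : Nat) : Int) + (t : Nat) + 1 = ((s + t + 1 : Nat) : Int) := by push_cast; ring
        have hge : PySem.List.pyGetD (pvScan frs 0) ((s : Int) + (t : Int) + 1) 0
            = (((frs.take (s + t + 1)).flatten.length : Nat) : Int) := by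
          rw [hcast, PySem.List.pyGetD_natCast, pvScan_getD frs 0 _ hst1]
          simp
        simp only [hgs, hge]
        rw [pvSlice_flatten frs s (s + t + 1) (by omega)]
        have hts : s + t + 1 - s = t + 1 := by omega
        rw [hts]
        have hlds : (frs.drop s).length = frs.length - s := by simp
        have htlt : t < ((frs.drop s).take ((mc + 1).toNat)).length := by
          simp [List.length_take]; omega
        rw [List.drop_eq_getElem_cons htlt, pvInnerB]
        have hgt : ((frs.drop s).take ((mc + 1).toNat))[t]'htlt
            = (frs.drop s)[t]'(by omega) := List.getElem_take
        rw [hgt]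
        have hpep : ((frs.drop s).take t).flatten ++ (frs.drop s)[t]'(by omega)
            = ((frs.drop s).take (t + 1)).flatten :=
          (pvFlattenTakeSucc (frs.drop s) t (by omega)).symm
        simp only [hpep]
        by_cases hb : maxL < ((((frs.drop s).take (t + 1)).flatten.length : Nat) : Int)
        · rw [if_pos hb, if_neg (by rintro ⟨-, h2⟩; exact absurd h2 (not_le.mpr hb)),
            List.nil_append]
          apply pvInnerA_nil _ _ _ _ _ _ ((t : Int) + 1) _ ?_ ((mc + 1).toNat) ((t : Int) + 1)
            (le_refl _) (by omega)
          intro i hlo hi hgi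
          have hi0 : 0 ≤ i := by omega
          obtain ⟨u, rfl⟩ : ∃ u : Nat, i = (u : Int) := ⟨i.toNat, by omega⟩
          have hu1 : t + 1 ≤ u := by omega
          have hsu1 : s + u + 1 ≤ frs.length := by omega
          have hcastu : ((s : Nat) : Int) + (u : Nat) + 1 = ((s + u + 1 : Nat) : Int) := by
            push_cast; ring
          have hgeu : PySem.List.pyGetD (pvScan frs 0) ((s : Int) + (u : Int) + 1) 0
              = (((frs.take (s + u + 1)).flatten.length : Nat) : Int) := by
            rw [hcastu, PySem.List.pyGetD_natCast, pvScan_getD frs 0 _ hsu1]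
            simp
          rw [hgs, hgeu, pvSlice_flatten frs s (s + u + 1) (by omega)]
          have : s + u + 1 - s = u + 1 := by omega
          rw [this]
          have hmono := pvLenMono (frs.drop s) (t + 1) (u + 1) (by omega)
          omega
        · rw [if_neg hb]
          congr 1
          · exact if_congr (and_iff_left (not_lt.mp hb)) rfl rfl
          · have hc1 : ((t : Nat) : Int) + 1 = ((t + 1 : Nat) : Int) := by push_cast; ring
            rw [hc1]
            exact ih (t + 1) (by omega)

theorem pvMain (sequence : String) (mc minL maxL : Int) :
    trypsin_cleave_py sequence mc minL maxL = trypsin_cleave_py_alt sequence mc minL maxL := by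
  unfold trypsin_cleave_py trypsin_cleave_py_alt
  cases h : sequence.toList with
  | nil => simp
  | cons c0 rest =>
    simp only [List.length_cons]
    rw [if_neg (by push_cast; omega)]
    set frs := pvFragments c0 rest with hfrs
    have hflat : frs.flatten = c0 :: rest := by
      have := pvFrag_flatten rest [] [c0] c0
      simpa [hfrs, pvFragments] using this
    have hsites : ((PySem.List.pyRange 1 ((rest.length + 1 : Nat) : Int) 1).foldl
        (fun acc i =>
          if (PySem.List.pyGetD (c0 :: rest) (i - 1) ' ' = 'K'
              ∨ PySem.List.pyGetD (c0 :: rest) (i - 1) ' ' = 'R')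
              ∧ PySem.List.pyGetD (c0 :: rest) i ' ' ≠ 'P'
          then acc ++ [i] else acc) [0])
        ++ [((rest.length + 1 : Nat) : Int)] = pvScan frs 0 := by
      have := pvSites_align (c0 :: rest) rest [c0] [] [c0] c0 (by simp) (by simp) (by simp) (by simp)
      simpa [pvScan, hfrs, pvFragments] using this
    rw [hsites]
    rw [PySem.List.foldl_append_eq_flatMap, PySem.List.foldl_append_eq_flatMap]
    simp only [List.nil_append]
    have hns : ((pvScan frs 0).length : Int) - 1 = (frs.length : Int) := by
      rw [pvScan_length]; push_cast; ring
    rw [hns]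
    apply List.flatMap_congr
    intro start hstart
    rw [PySem.List.mem_pyRange_one] at hstart
    obtain ⟨u, rfl⟩ : ∃ u : Nat, start = (u : Int) := ⟨start.toNat, by omega⟩
    have hu : u < frs.length := by omega
    have hnscast : ((pvScan frs 0).length : Int) = (frs.length : Int) + 1 := by
      rw [pvScan_length]; push_cast; ring
    rw [hnscast]
    have hA := pvInner_eq frs mc minL maxL u hu ((mc + 1).toNat) 0 (by omega)
    simp only [List.take_zero, List.flatten_nil, List.drop_zero, Nat.cast_zero] at hA
    rw [← hflat] at *
    rw [hA]
    congr 1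
    rw [show PySem.List.slice frs (some ((u : Nat) : Int)) (some (((u : Nat) : Int) + max (mc + 1) 0))
        = List.take ((((u : Nat) : Int) + max (mc + 1) 0).toNat - (((u : Nat) : Int)).toNat)
            (List.drop (((u : Nat) : Int)).toNat frs)
      from PySem.List.slice_toNat frs (by omega) (by have := le_max_right (mc + 1) (0 : Int); omega)]
    have h1 : ((u : Int)).toNat = u := by omega
    have h2 : ((u : Int) + max (mc + 1) 0).toNat - u = (mc + 1).toNat := by
      rcases le_total (mc + 1) 0 with hmc | hmc
      · rw [max_eq_right hmc]; omega
      · rw [max_eq_left hmc]; omega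
    rw [h1, h2]

-- ===== VERDICT (by name: the statement is the Claim_ definition above) =====
theorem trypsin_cleave_py_spec : Claim_equal_trypsin_cleave_py := by
  intro sequence missed_cleavages min_length max_length _
  exact pvMain sequence missed_cleavages min_length max_length
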